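-- pv_equiv track=rewrite | github.com/datalearningpr/Python-Challenge | src/32/32.py | generate_all_combination
-- ===== SOURCE A (Python) =====
-- from itertools import combinations
--
-- def get_real_num(input, count):
--     out = []
--     out.append(input[0]-1)
--     for i in range(1, len(input)):
--         out.append(input[i] - input[i - 1])
--     out.append(count + 1 - input[-1])
--     return out
--
-- def generate_all_combination(input, N):
--
--     count = len(input) + 1
--
--     left = N - sum(input)
--
--     output = []
--
--     if count != 0 and left >= count-2:
--
--         temp = list(combinations(list(range(1, left+2)), count - 1))
--         num_list = list([get_real_num(x, left) for x in temp])
--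
--         for j in num_list:
--             str = ""
--             for i in range(len(input)):
--                 str = str + j[i] * "0"
--                 str = str + input[i] * "1"
--             str = str + j[len(input)] * "0"
--             output.append(str)
--
--     return output
-- ===== SOURCE B (Python) =====
-- def generate_all_combination(input, N):
--     count = len(input) + 1
--     left = N - sum(input)
--     if not (count != 0 and left >= count - 2):
--         return []
--
--     def rec(first, rest, remaining, prefix):
--         if not rest:
--             return [prefix + remaining * "0"] if remaining >= 0 else []
--         ones, tail = rest[0], rest[1:]
--         lo = 0 if first else 1
--         res = []
--         for g in range(lo, remaining + 1):
--             res += rec(False, tail, remaining - g, prefix + g * "0" + ones * "1")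
--         return res
--
--     return rec(True, input, left, "")
-- ===== Notes on version B (the rewrite author's own statement) =====
-- stated objective: alternative
-- what changed: A materializes itertools.combinations of an index range and converts each tuple to gap sizes via get_real_num before a separate index-driven string-building loop; B enumerates the zero-gap compositions directly by structural recursion over the input list, building each output string as it recurses.
-- outside the precondition, e.g. on generate_all_combination([], 0): A raises IndexError, B returns ['']; on generate_all_combination([], 2): A raises IndexError, B returns ['00']
import Mathlib
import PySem

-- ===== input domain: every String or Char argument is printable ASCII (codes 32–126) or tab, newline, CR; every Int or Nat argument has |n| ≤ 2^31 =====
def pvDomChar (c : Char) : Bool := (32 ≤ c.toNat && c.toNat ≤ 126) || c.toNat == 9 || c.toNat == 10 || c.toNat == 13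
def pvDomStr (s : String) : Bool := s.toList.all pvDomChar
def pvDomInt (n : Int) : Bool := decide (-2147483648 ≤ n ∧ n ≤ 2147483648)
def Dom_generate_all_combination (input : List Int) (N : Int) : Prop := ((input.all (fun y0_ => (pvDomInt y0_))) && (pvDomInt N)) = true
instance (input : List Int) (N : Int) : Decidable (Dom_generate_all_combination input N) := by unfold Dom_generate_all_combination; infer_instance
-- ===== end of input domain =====

-- B replaces A's combinations+get_real_num pipeline by a direct recursive enumerator of the
-- gap (zero-run) sequences, building each output string as it recurses (objective: alternative).

-- ===== PORT A =====
def get_real_num (input : List Int) (count : Int) : List Int :=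
  let out : List Int := []
  let out := out ++ [PySem.List.pyGetD input 0 0 - 1]
  let out := (PySem.List.pyRange 1 (input.length : Int) 1).foldl
    (fun out i => out ++ [PySem.List.pyGetD input i 0 - PySem.List.pyGetD input (i - 1) 0]) out
  out ++ [count + 1 - PySem.List.pyGetD input (-1) 0]

-- the body of A's 'for j in num_list' loop: build one output string from the gap list j
def buildRow (input j : List Int) : List Char :=
  let s : List Char := []
  let s := (PySem.List.pyRange 0 (input.length : Int) 1).foldl
    (fun s i =>
      (s ++ PySem.List.pyRepeat ['0'] (PySem.List.pyGetD j i 0))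
        ++ PySem.List.pyRepeat ['1'] (PySem.List.pyGetD input i 0)) s
  s ++ PySem.List.pyRepeat ['0'] (PySem.List.pyGetD j (input.length : Int) 0)

def generate_all_combination (input : List Int) (N : Int) : List String :=
  let count : Int := (input.length : Int) + 1
  let left : Int := N - input.sum
  let output : List String := []
  if count ≠ 0 ∧ left ≥ count - 2 then
    let temp := PySem.List.combinations (PySem.List.pyRange 1 (left + 2) 1) (count - 1).toNat
    let num_list := temp.map (fun x => get_real_num x left)
    num_list.foldl (fun output j => output ++ [String.mk (buildRow input j)]) output
  else output

-- ===== PORT B =====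
def genRec (first : Bool) (rest : List Int) (remaining : Int) (pre : List Char) : List String :=
  match rest with
  | [] => if remaining ≥ 0 then [String.mk (pre ++ PySem.List.pyRepeat ['0'] remaining)] else []
  | ones :: tail =>
    (PySem.List.pyRange (if first then 0 else 1) (remaining + 1) 1).foldl
      (fun res g => res ++ genRec false tail (remaining - g)
        (pre ++ PySem.List.pyRepeat ['0'] g ++ PySem.List.pyRepeat ['1'] ones)) []
termination_by rest.length
decreasing_by simp

def generate_all_combination_alt (input : List Int) (N : Int) : List String :=
  let count : Int := (input.length : Int) + 1
  let left : Int := N - input.sum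
  if count ≠ 0 ∧ left ≥ count - 2 then genRec true input left [] else []

-- ===== PRECONDITION & SPEC =====
-- Pre_ excludes only the inputs where A raises IndexError: empty input with N ≥ -1
-- (get_real_num then reads input[0] of an empty combination tuple).
def Pre_generate_all_combination (input : List Int) (N : Int) : Prop := input = [] → N < -1
instance (input : List Int) (N : Int) : Decidable (Pre_generate_all_combination input N) := by unfold Pre_generate_all_combination; infer_instance
def pvWitness_generate_all_combination : List Int × Int := ([1, 2], 5)

def Spec_generate_all_combination (input : List Int) (N : Int) (out : List String) : Prop := out = generate_all_combination_alt input N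
instance (input : List Int) (N : Int) (out : List String) : Decidable (Spec_generate_all_combination input N out) := by unfold Spec_generate_all_combination; infer_instance

-- ===== CLAIM (what is proved, stated in full; the proofs are below) =====
def Claim_equal_generate_all_combination : Prop := ∀ (input : List Int) (N : Int), Dom_generate_all_combination input N → Pre_generate_all_combination input N → Spec_generate_all_combination input N (generate_all_combination input N)

-- ===== LEMMAS AND PROOFS =====

-- gap sequence of a combination x drawn from [a+?, b], relative to base a with cap b
def grel (a b : Int) : List Int → List Int
  | [] => [b - a]
  | x :: xs => (x - a) :: grel x b xs

-- interleave: gaps of zeros around the runs of ones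
def renderG : List Int → List Int → List Char
  | [], g :: _ => PySem.List.pyRepeat ['0'] g
  | [], [] => []
  | _ :: _, [] => []
  | n :: ns, g :: gs =>
      PySem.List.pyRepeat ['0'] g ++ PySem.List.pyRepeat ['1'] n ++ renderG ns gs

lemma grel_length (a b : Int) (xs : List Int) : (grel a b xs).length = xs.length + 1 := by
  induction xs generalizing a with
  | nil => simp [grel]
  | cons x xs ih => simp [grel, ih]

lemma pyRange_shift (c a b : Int) :
    PySem.List.pyRange (c + a) (c + b) 1 = (PySem.List.pyRange a b 1).map (fun g => c + g) := by
  rw [PySem.List.pyRange_one, PySem.List.pyRange_one]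
  have h : c + b - (c + a) = b - a := by ring
  rw [h, List.map_map]
  exact List.map_congr_left (fun k _ => by simp; ring)

lemma pyGetD_cons_pos (x : Int) (xs : List Int) (j d : Int) (h : 1 ≤ j) :
    PySem.List.pyGetD (x :: xs) j d = PySem.List.pyGetD xs (j - 1) d := by
  obtain ⟨n, rfl⟩ : ∃ n : Nat, j = (n : Int) + 1 := ⟨(j - 1).toNat, by omega⟩
  have h1 : (n : Int) + 1 = ((n + 1 : Nat) : Int) := by push_cast; ring
  have h2 : (n : Int) + 1 - 1 = (n : Int) := by ring
  rw [h2, h1, PySem.List.pyGetD_natCast, PySem.List.pyGetD_natCast]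
  simp

lemma comb1 : ∀ (n : Nat) (k : Nat) (a b : Int), (b - a).toNat = n →
    PySem.List.combinations (PySem.List.pyRange a b 1) (k + 1)
      = (PySem.List.pyRange a b 1).flatMap
          (fun x => (PySem.List.combinations (PySem.List.pyRange (x + 1) b 1) k).map (x :: ·)) := by
  intro n
  induction n with
  | zero =>
    intro k a b h
    rw [PySem.List.pyRange_one_eq_nil (by omega)]
    simp [PySem.List.combinations_nil_succ]
  | succ m ih =>
    intro k a b h
    rw [PySem.List.pyRange_one_cons (by omega)]
    rw [PySem.List.combinations_cons_succ]
    rw [List.flatMap_cons]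
    rw [ih k (a + 1) b (by omega)]

lemma bridge : ∀ (rest : List Int) (first : Bool) (c b : Int) (pre : List Char),
    (rest = [] → c ≤ b) →
    genRec first rest (b - c) pre
      = (PySem.List.combinations
            (PySem.List.pyRange (c + (if first then 0 else 1)) (b + 1) 1) rest.length).map
          (fun x => String.mk (pre ++ renderG rest (grel c b x))) := by
  intro rest
  induction rest with
  | nil =>
    intro first c b pre h
    have hcb : c ≤ b := h rfl
    simp [genRec, PySem.List.combinations_zero, grel, renderG]
    omega
  | cons n tail ih =>
    intro first c b pre _
    rw [genRec]
    rw [PySem.List.foldl_append_eq_flatMap, List.nil_append]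
    simp only [List.length_cons]
    rw [comb1 (b + 1 - (c + (if first then 0 else 1))).toNat tail.length _ _ rfl]
    have hshift : PySem.List.pyRange (c + (if first then 0 else 1)) (b + 1) 1
        = (PySem.List.pyRange (if first then 0 else 1) (b - c + 1) 1).map (fun g => c + g) := by
      have : b + 1 = c + (b - c + 1) := by ring
      rw [this, pyRange_shift]
    rw [hshift, List.map_flatMap, List.flatMap_map]
    refine List.flatMap_congr ?_  -- pointwise over g in range
    intro g hg
    have hg' := (PySem.List.mem_pyRange_one).1 hg
    have : b - c - g = b - (c + g) := by ring
    rw [this, ih false (c + g) b _ (fun _ => by omega)]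
    rw [List.map_map]
    refine List.map_congr_left ?_
    intro xs _
    simp only [Function.comp, grel, renderG]
    have : c + g - c = g := by ring
    rw [this]
    simp [List.append_assoc]

-- the diffs+last part of get_real_num is grel of the tail
lemma grn_tail : ∀ (xs : List Int) (x0 b : Int),
    (PySem.List.pyRange 1 ((x0 :: xs).length : Int) 1).map
        (fun i => PySem.List.pyGetD (x0 :: xs) i 0 - PySem.List.pyGetD (x0 :: xs) (i - 1) 0)
      ++ [b - (x0 :: xs).getLast (by simp)] = grel x0 b xs := by
  intro xs
  induction xs with
  | nil =>
    intro x0 b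
    simp [PySem.List.pyRange_one_eq_nil, grel]
  | cons x1 t ih =>
    intro x0 b
    have hlen : ((x0 :: x1 :: t).length : Int) = (t.length : Int) + 2 := by simp; ring
    rw [hlen, PySem.List.pyRange_one_cons (by omega)]
    have hshift : PySem.List.pyRange (1 + 1) ((t.length : Int) + 2) 1
        = (PySem.List.pyRange 1 ((t.length : Int) + 1) 1).map (fun g => 1 + g) := by
      have h2 : (t.length : Int) + 2 = 1 + ((t.length : Int) + 1) := by ring
      have h1 : (1 : Int) + 1 = 1 + 1 := rfl
      rw [h2, pyRange_shift 1 1 ((t.length : Int) + 1)]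
    rw [hshift, List.map_cons, List.map_map]
    have hmap : (PySem.List.pyRange 1 ((t.length : Int) + 1) 1).map
          ((fun i => PySem.List.pyGetD (x0 :: x1 :: t) i 0
             - PySem.List.pyGetD (x0 :: x1 :: t) (i - 1) 0) ∘ (fun g => 1 + g))
        = (PySem.List.pyRange 1 ((x1 :: t).length : Int) 1).map
          (fun i => PySem.List.pyGetD (x1 :: t) i 0 - PySem.List.pyGetD (x1 :: t) (i - 1) 0) := by
      have hl : ((x1 :: t).length : Int) = (t.length : Int) + 1 := by simp
      rw [hl]
      refine List.map_congr_left ?_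
      intro i hi
      have hi' := (PySem.List.mem_pyRange_one).1 hi
      simp only [Function.comp]
      rw [pyGetD_cons_pos x0 _ (1 + i) 0 (by omega),
          pyGetD_cons_pos x0 _ (1 + i - 1) 0 (by omega)]
      have e1 : 1 + i - 1 = i := by ring
      rw [e1]
    have hfirst : PySem.List.pyGetD (x0 :: x1 :: t) 1 0
        - PySem.List.pyGetD (x0 :: x1 :: t) (1 - 1) 0 = x1 - x0 := by
      rw [pyGetD_cons_pos x0 _ 1 0 (by omega)]
      norm_num [PySem.List.pyGetD_zero_cons]
    have hlast : (x0 :: x1 :: t).getLast (by simp) = (x1 :: t).getLast (by simp) := by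
      simp [List.getLast_cons]
    rw [List.cons_append, hfirst, hmap, hlast, ih x1 b]
    rfl

lemma grn_eq_grel (x : List Int) (c : Int) (hx : x ≠ []) :
    get_real_num x c = grel 1 (c + 1) x := by
  obtain ⟨x0, xs, rfl⟩ := List.exists_cons_of_ne_nil hx
  have hneg : PySem.List.pyGetD (x0 :: xs) (-1) 0 = (x0 :: xs).getLast (by simp) :=
    PySem.List.pyGetD_neg_one (x0 :: xs) 0 (by simp)
  simp only [get_real_num, List.nil_append]
  rw [PySem.List.foldl_append_singleton_eq_map, PySem.List.pyGetD_zero_cons, hneg,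
      List.append_assoc, grn_tail xs x0 (c + 1)]
  simp [grel]

-- A's inner string loop is renderG
lemma renderA : ∀ (input j : List Int) (pre : List Char), j.length = input.length + 1 →
    ((PySem.List.pyRange 0 (input.length : Int) 1).foldl
        (fun s i =>
          (s ++ PySem.List.pyRepeat ['0'] (PySem.List.pyGetD j i 0))
            ++ PySem.List.pyRepeat ['1'] (PySem.List.pyGetD input i 0)) pre)
      ++ PySem.List.pyRepeat ['0'] (PySem.List.pyGetD j (input.length : Int) 0)
      = pre ++ renderG input j := by
  intro input
  induction input with
  | nil =>
    intro j pre hlen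
    have hj : j ≠ [] := by rintro rfl; simp at hlen
    obtain ⟨g, j', rfl⟩ := List.exists_cons_of_ne_nil hj
    have : j' = [] := by simpa using hlen
    subst this
    simp [PySem.List.pyRange_one_eq_nil, renderG, PySem.List.pyGetD_zero_cons]
  | cons n tail ih =>
    intro j pre hlen
    have hj : j ≠ [] := by rintro rfl; simp at hlen
    obtain ⟨g, gs, rfl⟩ := List.exists_cons_of_ne_nil hj
    have hgs : gs.length = tail.length + 1 := by simpa using hlen
    have hl : ((n :: tail).length : Int) = (tail.length : Int) + 1 := by simp
    rw [hl, PySem.List.pyRange_one_cons (by omega)]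
    rw [List.foldl_cons]
    have hshift : PySem.List.pyRange (0 + 1) ((tail.length : Int) + 1) 1
        = (PySem.List.pyRange 0 (tail.length : Int) 1).map (fun g => 1 + g) := by
      have h2 : (tail.length : Int) + 1 = 1 + (tail.length : Int) := by ring
      have h1 : (0 : Int) + 1 = 1 + 0 := by ring
      rw [h1, h2, pyRange_shift 1 0 (tail.length : Int)]
    rw [hshift, List.foldl_map]
    have hcong : ∀ (s : List Char), ∀ i ∈ PySem.List.pyRange 0 (tail.length : Int) 1,
        ((s ++ PySem.List.pyRepeat ['0'] (PySem.List.pyGetD (g :: gs) (1 + i) 0))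
            ++ PySem.List.pyRepeat ['1'] (PySem.List.pyGetD (n :: tail) (1 + i) 0))
        = ((s ++ PySem.List.pyRepeat ['0'] (PySem.List.pyGetD gs i 0))
            ++ PySem.List.pyRepeat ['1'] (PySem.List.pyGetD tail i 0)) := by
      intro s i hi
      have hi' := (PySem.List.mem_pyRange_one).1 hi
      rw [pyGetD_cons_pos g _ (1 + i) 0 (by omega), pyGetD_cons_pos n _ (1 + i) 0 (by omega)]
      have e : 1 + i - 1 = i := by ring
      rw [e]
    rw [PySem.List.foldl_congr_mem _ _ _ _ hcong]
    have hlastidx : PySem.List.pyGetD (g :: gs) ((tail.length : Int) + 1) 0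
        = PySem.List.pyGetD gs (tail.length : Int) 0 := by
      rw [pyGetD_cons_pos g _ _ 0 (by omega)]
      norm_num
    rw [hlastidx]
    rw [ih gs _ hgs]
    simp [renderG, PySem.List.pyGetD_zero_cons, List.append_assoc]

lemma buildRow_eq (input j : List Int) (h : j.length = input.length + 1) :
    buildRow input j = renderG input j := by
  simp only [buildRow]
  rw [renderA input j [] h]
  simp

-- ===== VERDICT (by name: the statement is the Claim_ definition above) =====
theorem generate_all_combination_spec : Claim_equal_generate_all_combination := by
  intro input N _ hpre
  unfold Spec_generate_all_combination generate_all_combination generate_all_combination_alt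
  simp only []
  by_cases hguard : ((input.length : Int) + 1 ≠ 0 ∧ N - input.sum ≥ (input.length : Int) + 1 - 2)
  · rw [if_pos hguard, if_pos hguard]
    have hne : input ≠ [] := by
      rintro rfl
      have h1 := hpre rfl
      simp at hguard
      omega
    have hpos : 0 < input.length := List.length_pos_of_ne_nil hne
    have hB := bridge input true 1 (N - input.sum + 1) [] (fun h => absurd h hne)
    have e1 : N - input.sum + 1 - 1 = N - input.sum := by ring
    have e2 : (1 : Int) + (if (true : Bool) = true then (0 : Int) else 1) = 1 := by norm_num
    have e3 : N - input.sum + 1 + 1 = N - input.sum + 2 := by ring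
    rw [e1, e2, e3] at hB
    rw [hB]
    have htonat : ((input.length : Int) + 1 - 1).toNat = input.length := by simp
    rw [htonat, PySem.List.foldl_append_singleton_eq_map, List.nil_append, List.map_map]
    refine List.map_congr_left ?_
    intro x hx
    have hxlen : x.length = input.length := PySem.List.length_of_mem_combinations hx
    have hxne : x ≠ [] := by
      intro h
      rw [h] at hxlen
      simp at hxlen
      omega
    simp only [Function.comp]
    rw [grn_eq_grel x (N - input.sum) hxne]
    rw [buildRow_eq input _ (by rw [grel_length, hxlen])]
    simp
  · rw [if_neg hguard, if_neg hguard]
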